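-- pv_equiv track=rewrite | github.com/yao12310/AmortizedHMM | utils/misc.py | valid_cpg_mc_kmer
-- ===== SOURCE A (Python) =====
-- def valid_cpg_mc_kmer(kmer):
--     """
--     Determine if a k-mer is either unmethylated, or is methylated at a CpG site.
--     kmer : str
--         string k-mer (assume alphabet = 'ACGTM')
--     return : bool
--         whether kmer is valid or not
--     """
--     if 'M' not in kmer:
--         return True
--     for i in range(len(kmer)):
--         if kmer[i] == 'M':
--             if i + 1 < len(kmer) and kmer[i + 1] != 'G':
--                 return False
--     return True
-- ===== SOURCE B (Python) =====
-- import re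
--
-- def valid_cpg_mc_kmer(kmer):
--     """
--     Determine if a k-mer is either unmethylated, or is methylated at a CpG site.
--     Regex formulation: invalid iff some 'M' is immediately followed by a non-'G'.
--     """
--     return re.search('M[^G]', kmer) is None
-- ===== Notes on version B (the rewrite author's own statement) =====
-- stated objective: idiomatic
-- what changed: Replaces the explicit membership pre-check plus index-by-index scan with a single regex search for an M immediately followed by a non-G character, returning True iff no match exists.
import Mathlib
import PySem

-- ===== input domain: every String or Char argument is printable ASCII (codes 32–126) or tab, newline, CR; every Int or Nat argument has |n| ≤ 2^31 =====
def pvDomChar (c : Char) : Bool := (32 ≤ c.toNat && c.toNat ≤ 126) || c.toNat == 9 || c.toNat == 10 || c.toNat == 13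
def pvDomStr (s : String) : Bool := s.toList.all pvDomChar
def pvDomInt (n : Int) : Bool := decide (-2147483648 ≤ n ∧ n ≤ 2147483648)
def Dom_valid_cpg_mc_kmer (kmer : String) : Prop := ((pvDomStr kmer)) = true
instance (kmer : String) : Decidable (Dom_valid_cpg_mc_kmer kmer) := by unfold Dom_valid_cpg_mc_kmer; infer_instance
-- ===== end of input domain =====

-- B re-implements A's membership check + indexed scan as a single regex search for 'M[^G]'; same value everywhere (idiomatic, not faster).

-- ===== PORT A =====
-- the indexed 'for i in range(len(kmer))' loop with early 'return False'
def pvAGo (l : List Char) (i : Nat) : Bool :=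
  if h : i < l.length then
    if l[i] = 'M' ∧ i + 1 < l.length ∧ l[i + 1]! ≠ 'G' then false
    else pvAGo l (i + 1)
  else true
termination_by l.length - i

def valid_cpg_mc_kmer (kmer : String) : Bool :=
  if ¬ (kmer.toList).contains 'M' then true
  else pvAGo kmer.toList 0

-- ===== PORT B =====
-- re.search('M[^G]', kmer) is None : no adjacent pair (M, c) with c ≠ 'G'
def valid_cpg_mc_kmer_alt (kmer : String) : Bool :=
  (((kmer.toList).zip (kmer.toList).tail).find? (fun p => p.1 == 'M' && p.2 != 'G')).isNone

-- ===== PRECONDITION & SPEC =====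
def Spec_valid_cpg_mc_kmer (kmer : String) (out : Bool) : Prop := out = valid_cpg_mc_kmer_alt kmer
instance (kmer : String) (out : Bool) : Decidable (Spec_valid_cpg_mc_kmer kmer out) := by unfold Spec_valid_cpg_mc_kmer; infer_instance

-- ===== CLAIM (what is proved, stated in full; the proofs are below) =====
def Claim_equal_valid_cpg_mc_kmer : Prop := ∀ (kmer : String), Dom_valid_cpg_mc_kmer kmer → Spec_valid_cpg_mc_kmer kmer (valid_cpg_mc_kmer kmer)

-- ===== LEMMAS AND PROOFS =====

-- no match found ↔ every adjacent pair is fine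
lemma find?_isNone_iff_all (l : List Char) :
    ((l.zip l.tail).find? (fun p => p.1 == 'M' && p.2 != 'G')).isNone
      = (l.zip l.tail).all (fun p => !(p.1 == 'M' && p.2 != 'G')) := by
  induction (l.zip l.tail) with
  | nil => rfl
  | cons a t ih =>
    simp only [List.find?_cons, List.all_cons]
    by_cases h : (a.1 == 'M' && a.2 != 'G') = true
    · simp [h]
    · simp [h, ih]

-- the indexed loop from i computes 'all pairs fine' over the suffix from i
lemma pvAGo_eq_all (l : List Char) (i : Nat) :
    pvAGo l i = ((l.drop i).zip (l.drop i).tail).all (fun p => !(p.1 == 'M' && p.2 != 'G')) := by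
  by_cases h : i < l.length
  · rw [pvAGo]
    simp only [dif_pos h]
    have hdrop : l.drop i = l[i] :: l.drop (i + 1) := List.drop_eq_getElem_cons h
    by_cases h2 : i + 1 < l.length
    · have hdrop2 : l.drop (i + 1) = l[i + 1] :: l.drop (i + 2) := List.drop_eq_getElem_cons h2
      have hget : l[i + 1]! = l[i + 1] := getElem!_pos l (i + 1) h2
      rw [hdrop, hdrop2]
      simp only [List.tail_cons, List.zip_cons_cons, List.all_cons]
      rw [← hdrop2]
      by_cases hb : l[i] = 'M' ∧ l[i + 1]! ≠ 'G'
      · have hc : (l[i] = 'M' ∧ i + 1 < l.length ∧ l[i + 1]! ≠ 'G') := ⟨hb.1, h2, hb.2⟩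
        simp only [if_pos hc]
        have hne : l[i + 1] ≠ 'G' := by rw [← hget]; exact hb.2
        have : (l[i] == 'M' && l[i+1] != 'G') = true := by
          simp [hb.1, bne_iff_ne, hne]
        simp [this]
      · have hnc : ¬ (l[i] = 'M' ∧ i + 1 < l.length ∧ l[i + 1]! ≠ 'G') := by
          intro ⟨x, _, z⟩; exact hb ⟨x, z⟩
        simp only [if_neg hnc]
        have : (l[i] == 'M' && l[i+1] != 'G') = false := by
          by_cases hm : l[i] = 'M'
          · have hg : l[i+1] = 'G' := by
              by_contra hg; exact hb ⟨hm, by rw [hget]; exact hg⟩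
            simp [hg]
          · simp [hm]
        simp [this, pvAGo_eq_all l (i + 1)]
    · -- last index: the branch condition is false, and the suffix has no pairs
      have hnc : ¬ (l[i] = 'M' ∧ i + 1 < l.length ∧ l[i + 1]! ≠ 'G') := by
        intro ⟨_, hlt, _⟩; exact h2 hlt
      simp only [if_neg hnc]
      have hlen : l.length = i + 1 := by omega
      have : l.drop (i + 1) = [] := List.drop_eq_nil_of_le (by omega)
      rw [pvAGo_eq_all l (i + 1), hdrop, this]
      simp
  · rw [pvAGo]
    simp only [dif_neg h]
    have : l.drop i = [] := List.drop_eq_nil_of_le (by omega)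
    simp [this]
termination_by l.length - i

-- a string without 'M' has no bad pair
lemma all_of_not_mem (l : List Char) (hm : 'M' ∉ l) :
    (l.zip l.tail).all (fun p => !(p.1 == 'M' && p.2 != 'G')) = true := by
  rw [List.all_eq_true]
  intro p hp
  have h1 : p.1 ∈ l := (List.of_mem_zip hp).1
  have : ¬ (p.1 = 'M') := by
    intro he; exact hm (he ▸ h1)
  simp [this]

-- ===== VERDICT (by name: the statement is the Claim_ definition above) =====
theorem valid_cpg_mc_kmer_spec : Claim_equal_valid_cpg_mc_kmer := by
  intro kmer _
  unfold Spec_valid_cpg_mc_kmer valid_cpg_mc_kmer valid_cpg_mc_kmer_alt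
  rw [find?_isNone_iff_all]
  by_cases hm : 'M' ∈ kmer.toList
  · rw [if_neg (by simpa using hm)]
    have := pvAGo_eq_all kmer.toList 0
    simpa using this
  · rw [if_pos (by simpa using hm)]
    exact (all_of_not_mem kmer.toList hm).symm
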